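-- pv_equiv track=rewrite | github.com/Yijin-Zeng/wmwm-python | wmwm/exactDistributionWMWStatistic.py | num_seq
-- ===== SOURCE A (Python) =====
-- def num_seq(U, n, m):
--     '''
--     Compute the number sequences rank sum statistics: U, number of samples in x and y: n and m.
--
--     Parameters
--     ----------
--     U : int
--         Replace each x by a 0 and each y by a 1. Let U count the number of times a 1 precedes a 0.
--     n : int
--         Sample size of x.
--     m : int
--         Sample size of y.
--
--     Returns
--     -------
--     int
--         The number of sequences of n O's and m 1's in each of which a 1 precedes a 0 U times.
--
--     References
--     ----------
--     Mann HB, Whitney DR. On a test of whether one of two random variables is stochastically larger than the other. The annals of mathematical statistics. 1947 Mar 1:50-60.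
--
--     '''
--
--     if U < 0:
--         return 0
--
--     if (n == 0 or m == 0) and U != 0:
--         return 0
--
--     if (n == 0 or m == 0) and U == 0:
--         return 1
--
--     return num_seq(U - m, n - 1, m) + num_seq(U, n, m-1)
-- ===== SOURCE B (Python) =====
-- def num_seq(U, n, m):
--     # Bottom-up DP tabulation of the Mann-Whitney count (O(U*min(n,U)*min(m,U)) instead of
--     # A's exponential naive recursion).  prev[i][u] = number of sequences of
--     # i 0's and j 1's with u inversions, for the current level j.
--     if U < 0 or n < 0 or m < 0:
--         return 0
--     # at most min(n, U) zeros and min(m, U) ones can take part in U inversions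
--     n = min(n, U)
--     m = min(m, U)
--     prev = [[1] + [0] * U for _ in range(n + 1)]          # level j = 0
--     for j in range(1, m + 1):
--         below = [1] + [0] * U                             # row i = 0
--         cur = [below]
--         for prow in prev[1:]:
--             below = [a + b for a, b in zip([0] * j + below, prow)]
--             cur.append(below)
--         prev = cur
--     return prev[-1][-1]
-- ===== Notes on version B (the rewrite author's own statement) =====
-- stated objective: faster
-- what changed: Replaces A's naive exponential recursion with a bottom-up dynamic-programming tabulation (rows built by shift-and-zip) over clamped dimensions min(n,U), min(m,U).
-- outside the precondition, e.g. on num_seq(0, -1, 1): A returns 1, B returns 0; on num_seq(0, 0, -1): A returns 1, B returns 0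
import Mathlib
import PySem

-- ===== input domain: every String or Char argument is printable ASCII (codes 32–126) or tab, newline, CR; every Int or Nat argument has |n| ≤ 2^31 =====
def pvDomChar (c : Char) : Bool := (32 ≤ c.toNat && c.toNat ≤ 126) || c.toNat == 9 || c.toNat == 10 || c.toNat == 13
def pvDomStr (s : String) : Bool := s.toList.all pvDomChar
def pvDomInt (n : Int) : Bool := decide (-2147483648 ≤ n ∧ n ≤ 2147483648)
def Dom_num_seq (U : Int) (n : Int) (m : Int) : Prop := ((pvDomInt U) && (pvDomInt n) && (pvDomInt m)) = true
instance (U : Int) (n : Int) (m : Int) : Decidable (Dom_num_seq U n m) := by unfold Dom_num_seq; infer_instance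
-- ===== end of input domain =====

-- B replaces A's naive exponential recursion by a bottom-up DP tabulation of the
-- (inversions, zeros, ones) table (objective: faster).

-- ===== PORT A =====
-- Literal port of A's recursion; the fuel only makes the recursion total (on Pre_
-- the fuel (n+m).toNat+1 is sufficient: each recursive call decreases n+m by one).
def numSeqFuel : Nat → Int → Int → Int → Int
  | 0, _, _, _ => 0
  | f+1, U, n, m =>
    if U < 0 then 0
    else if (n = 0 ∨ m = 0) ∧ U ≠ 0 then 0
    else if (n = 0 ∨ m = 0) ∧ U = 0 then 1
    else numSeqFuel f (U - m) (n - 1) m + numSeqFuel f U n (m - 1)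

def num_seq (U : Int) (n : Int) (m : Int) : Int :=
  numSeqFuel ((n + m).toNat + 1) U n m

-- ===== PORT B =====
-- bRow U = [1] + [0]*U
def bRow (U : Nat) : List Int := 1 :: List.replicate U 0

-- one iteration of B's inner loop body:
--   below = [a+b for a,b in zip([0]*j + below, prow)]; cur.append(below)
def bStep (j : Int) (st : List Int × List (List Int)) (prow : List Int) : List Int × List (List Int) :=
  let b := List.zipWith (· + ·) (List.replicate j.toNat 0 ++ st.1) prow
  (b, st.2 ++ [b])

-- one iteration of B's outer loop: build level j from level j-1 (prev[1:] is slice)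
def bLevel (U : Nat) (prev : List (List Int)) (j : Int) : List (List Int) :=
  ((PySem.List.slice prev (some 1) none).foldl (bStep j) (bRow U, [bRow U])).2

def num_seq_alt (U : Int) (n : Int) (m : Int) : Int :=
  if U < 0 ∨ n < 0 ∨ m < 0 then 0
  else
    -- n = min(n, U); m = min(m, U)
    let n1 : Int := min n U
    let m1 : Int := min m U
    let prev0 : List (List Int) := (List.range (n1.toNat + 1)).map (fun _ => bRow U.toNat)
    let prev := (PySem.List.pyRange 1 (m1 + 1) 1).foldl (bLevel U.toNat) prev0
    -- prev[-1][-1]: both lists are provably nonempty here, the getD defaults are never used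
    ((prev.getLast?.getD []).getLast?.getD 0)

-- ===== PRECONDITION & SPEC =====
-- Pre_ excludes inputs with U ≥ 0 and a negative n or m: there A either diverges
-- (RecursionError, when m < 0 and n ≠ 0) or returns values that are accidents of its
-- recursion on meaningless negative sample sizes (e.g. A (0,-1,1) = 1); B returns 0 there.
def Pre_num_seq (U : Int) (n : Int) (m : Int) : Prop := U < 0 ∨ (0 ≤ n ∧ 0 ≤ m)
instance (U : Int) (n : Int) (m : Int) : Decidable (Pre_num_seq U n m) := by unfold Pre_num_seq; infer_instance
def pvWitness_num_seq : Int × Int × Int := (3, 2, 3)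

def Spec_num_seq (U : Int) (n : Int) (m : Int) (out : Int) : Prop := out = num_seq_alt U n m
instance (U : Int) (n : Int) (m : Int) (out : Int) : Decidable (Spec_num_seq U n m out) := by unfold Spec_num_seq; infer_instance

-- ===== CLAIM (what is proved, stated in full; the proofs are below) =====
def Claim_equal_num_seq : Prop := ∀ (U : Int) (n : Int) (m : Int), Dom_num_seq U n m → Pre_num_seq U n m → Spec_num_seq U n m (num_seq U n m)

-- ===== LEMMAS AND PROOFS =====

-- the mathematical table: FF j i u = number of sequences of i 0's and j 1's with u inversions
def rowF (j : Nat) (P : Nat → Int → Int) : Nat → Int → Int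
  | 0 => fun u => if u = 0 then 1 else 0
  | i+1 => fun u => (if u < (j : Int) then 0 else rowF j P i (u - j)) + P (i+1) u

def FF : Nat → Nat → Int → Int
  | 0 => fun _ u => if u = 0 then 1 else 0
  | j+1 => rowF (j+1) (FF j)

lemma FF_neg : ∀ (j i : Nat) (u : Int), u < 0 → FF j i u = 0 := by
  intro j
  induction j with
  | zero =>
    intro i u hu
    show (if u = 0 then (1:Int) else 0) = 0
    rw [if_neg (by omega)]
  | succ j ih =>
    intro i u hu
    cases i with
    | zero =>
      show (if u = 0 then (1:Int) else 0) = 0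
      rw [if_neg (by omega)]
    | succ i =>
      show (if u < ((j+1 : Nat) : Int) then 0 else rowF (j+1) (FF j) i (u - (j+1))) + FF j (i+1) u = 0
      rw [if_pos (by push_cast; omega), ih (i+1) u hu]
      simp

lemma FF_row0 (j : Nat) (u : Int) : FF j 0 u = if u = 0 then 1 else 0 := by
  cases j <;> rfl

lemma FF_rec (j i : Nat) (u : Int) :
    FF (j+1) (i+1) u = FF (j+1) i (u - (j+1)) + FF j (i+1) u := by
  show (if u < ((j+1 : Nat) : Int) then 0 else rowF (j+1) (FF j) i (u - (j+1))) + FF j (i+1) u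
       = FF (j+1) i (u - (j+1)) + FF j (i+1) u
  have hrow : rowF (j+1) (FF j) i = FF (j+1) i := rfl
  by_cases h : u < ((j+1 : Nat) : Int)
  · rw [if_pos h]
    rw [show FF (j+1) i (u - ((j:Int)+1)) = 0 from FF_neg _ _ _ (by push_cast at h; omega)]
  · rw [if_neg h, hrow]

-- A's recursion computes FF (with sufficient fuel)
lemma numSeqFuel_eq_FF : ∀ (f : Nat) (U n m : Int), 0 ≤ n → 0 ≤ m → (n + m).toNat < f →
    numSeqFuel f U n m = FF m.toNat n.toNat U := by
  intro f
  induction f with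
  | zero => intro U n m hn hm hf; exact absurd hf (Nat.not_lt_zero _)
  | succ f ih =>
    intro U n m hn hm hf
    show (if U < 0 then 0
      else if (n = 0 ∨ m = 0) ∧ U ≠ 0 then 0
      else if (n = 0 ∨ m = 0) ∧ U = 0 then 1
      else numSeqFuel f (U - m) (n - 1) m + numSeqFuel f U n (m - 1)) = FF m.toNat n.toNat U
    by_cases hU : U < 0
    · rw [if_pos hU, FF_neg _ _ _ hU]
    rw [if_neg hU]
    by_cases hz : n = 0 ∨ m = 0
    · have hFF : FF m.toNat n.toNat U = if U = 0 then 1 else 0 := by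
        rcases hz with h | h
        · rw [show n.toNat = 0 by omega]; exact FF_row0 _ _
        · rw [show m.toNat = 0 by omega]; rfl
      by_cases hU0 : U = 0
      · rw [if_neg (by tauto), if_pos ⟨hz, hU0⟩, hFF, if_pos hU0]
      · rw [if_pos ⟨hz, hU0⟩, hFF, if_neg hU0]
    · rw [if_neg (by tauto), if_neg (by tauto)]
      have e1 : numSeqFuel f (U - m) (n - 1) m = FF m.toNat (n-1).toNat (U - m) :=
        ih (U - m) (n-1) m (by omega) hm (by omega)
      have e2 : numSeqFuel f U n (m - 1) = FF (m-1).toNat n.toNat U :=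
        ih U n (m-1) hn (by omega) (by omega)
      rw [e1, e2]
      have hmn : m.toNat = (m-1).toNat + 1 := by omega
      have hnn : n.toNat = (n-1).toNat + 1 := by omega
      rw [hmn, hnn, FF_rec]
      congr 2; omega

-- the row of the DP table at level j, index i, as a list over u = 0..U
def rowList (j i U : Nat) : List Int := (List.range (U+1)).map (fun u => FF j i (Int.ofNat u))

lemma length_rowList (j i U : Nat) : (rowList j i U).length = U + 1 := by
  simp [rowList]

lemma rowList_getElem (j i U k : Nat) (h : k < U + 1) :
    (rowList j i U)[k]'(by rw [length_rowList]; exact h) = FF j i (k : Int) := by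
  unfold rowList
  rw [List.getElem_map, List.getElem_range]
  rfl

lemma bRow_eq_rowList0 (j U : Nat) : bRow U = rowList j 0 U := by
  apply List.ext_getElem
  · simp [bRow, rowList]
  · intro k h1 h2
    rw [rowList_getElem j 0 U k (by rw [length_rowList] at h2; exact h2), FF_row0]
    cases k with
    | zero => simp [bRow]
    | succ k =>
      show (List.replicate U (0:Int))[k]'(by simp [bRow] at h1; simpa using h1) = _
      rw [List.getElem_replicate, if_neg (by positivity)]

lemma FF_lvl0 (i : Nat) (u : Int) : FF 0 i u = if u = 0 then 1 else 0 := rfl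

lemma bRow_eq_rowList_lvl0 (i U : Nat) : bRow U = rowList 0 i U := by
  apply List.ext_getElem
  · simp [bRow, rowList]
  · intro k h1 h2
    rw [rowList_getElem 0 i U k (by rw [length_rowList] at h2; exact h2), FF_lvl0]
    cases k with
    | zero => simp [bRow]
    | succ k =>
      show (List.replicate U (0:Int))[k]'(by simp [bRow] at h1; simpa using h1) = _
      rw [List.getElem_replicate, if_neg (by positivity)]

lemma zip_step (j i U : Nat) :
    List.zipWith (· + ·) (List.replicate (j+1) 0 ++ rowList (j+1) i U) (rowList j (i+1) U)
      = rowList (j+1) (i+1) U := by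
  apply List.ext_getElem
  · simp [rowList]
  · intro k h1 h2
    have hk : k < U + 1 := by rw [length_rowList] at h2; exact h2
    rw [List.getElem_zipWith, rowList_getElem j (i+1) U k hk, rowList_getElem (j+1) (i+1) U k hk,
      FF_rec]
    congr 1
    by_cases hkj : k < j + 1
    · rw [List.getElem_append_left (by simpa using hkj), List.getElem_replicate,
      FF_neg (j+1) i ((k:Int) - (j+1)) (by omega)]
    · rw [List.getElem_append_right (by simpa using hkj)]
      have hkU : k - (j+1) < U + 1 := by omega
      rw [show ∀ (hh : k - (List.replicate (j+1) (0:Int)).length < (rowList (j+1) i U).length),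
            (rowList (j+1) i U)[k - (List.replicate (j+1) (0:Int)).length]'hh
              = FF (j+1) i ((k - (j+1) : Nat) : Int) from by
          intro hh
          simp only [List.length_replicate] at hh ⊢
          exact rowList_getElem (j+1) i U (k - (j+1)) (by omega)]
      congr 1
      omega

lemma bStep_succ (j : Nat) (st : List Int × List (List Int)) (prow : List Int) :
    bStep ((j:Int)+1) st prow
      = (List.zipWith (· + ·) (List.replicate (j+1) 0 ++ st.1) prow,
         st.2 ++ [List.zipWith (· + ·) (List.replicate (j+1) 0 ++ st.1) prow]) := by
  unfold bStep
  rw [show ((j:Int)+1).toNat = j+1 by omega]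

lemma inner_fold (j U : Nat) : ∀ (N : Nat),
    (((List.range N).map (fun i => rowList j (i+1) U)).foldl (bStep ((j:Int)+1))
        (rowList (j+1) 0 U, [rowList (j+1) 0 U]))
      = (rowList (j+1) N U, (List.range (N+1)).map (fun i => rowList (j+1) i U)) := by
  intro N
  induction N with
  | zero => simp
  | succ N ih =>
    rw [List.range_succ, List.map_append, List.foldl_append, ih]
    simp only [List.map_cons, List.map_nil, List.foldl_cons, List.foldl_nil]
    rw [bStep_succ, zip_step]
    rw [show List.range (N+1+1) = List.range (N+1) ++ [N+1] from List.range_succ, List.map_append]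
    simp

lemma outer_fold (U n : Nat) : ∀ (M : Nat),
    (PySem.List.pyRange 1 ((M:Int) + 1) 1).foldl (bLevel U)
        ((List.range (n+1)).map (fun i => rowList 0 i U))
      = (List.range (n+1)).map (fun i => rowList M i U) := by
  intro M
  induction M with
  | zero => rw [PySem.List.pyRange_one_eq_nil (by omega), List.foldl_nil]
  | succ M ih =>
    rw [show ((M+1:Nat):Int) + 1 = ((M:Int)+1) + 1 by push_cast; ring,
      PySem.List.pyRange_one_succ_right (by omega), List.foldl_append, ih,
      List.foldl_cons, List.foldl_nil]
    unfold bLevel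
    rw [PySem.List.slice_from_one,
      show ((List.range (n+1)).map (fun i => rowList M i U)).tail
          = (List.range n).map (fun i => rowList M (i+1) U) from by
        rw [List.range_succ_eq_map, List.map_cons, List.tail_cons, List.map_map]; rfl,
      show bRow U = rowList (M+1) 0 U from bRow_eq_rowList0 (M+1) U,
      inner_fold M U n]

lemma getLast_map_range {α : Type} (g : Nat → α) (N : Nat) (d : α) :
    (((List.range (N+1)).map g).getLast?.getD d) = g N := by
  rw [List.range_succ, List.map_append, List.map_cons, List.map_nil, List.getLast?_concat]
  rfl

-- f(·,·,0) ≡ [u = 0] at every level, i.e. the count of the empty arrangement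
lemma FF_zero : ∀ (j i : Nat), FF j i 0 = 1 := by
  intro j
  induction j with
  | zero => intro i; rfl
  | succ j ih =>
    intro i
    cases i with
    | zero => rfl
    | succ i =>
      rw [FF_rec, FF_neg (j+1) i (0 - (j+1)) (by omega), ih (i+1)]
      simp

-- stabilisation in the number of 1's: beyond u more 1's cannot add arrangements
lemma FF_stab_j (j i : Nat) (u : Int) (_hu : 0 ≤ u) (hj : u ≤ (j:Int)) :
    FF (j+1) i u = FF j i u := by
  cases i with
  | zero => rw [FF_row0, FF_row0]
  | succ i =>
    rw [FF_rec, FF_neg (j+1) i (u - (j+1)) (by omega)]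
    simp

-- stabilisation in the number of 0's: beyond u more 0's cannot add arrangements
lemma FF_stab_i : ∀ (t : Nat), ∀ (j i : Nat) (u : Int), 0 ≤ u → u.toNat ≤ t → u ≤ (i:Int) →
    FF j (i+1) u = FF j i u := by
  intro t
  induction t with
  | zero =>
    intro j i u hu ht _
    have : u = 0 := by omega
    subst this
    rw [FF_zero, FF_zero]
  | succ t ih =>
    intro j
    induction j with
    | zero => intro i u hu ht hi; rfl
    | succ j ihj =>
      intro i u hu ht hi
      cases i with
      | zero =>
        have : u = 0 := by omega
        subst this
        rw [FF_zero, FF_zero]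
      | succ i =>
        rw [FF_rec j (i+1) u, FF_rec j i u]
        congr 1
        · by_cases hneg : u - ((j:Int)+1) < 0
          · rw [FF_neg (j+1) (i+1) _ hneg, FF_neg (j+1) i _ hneg]
          · exact ih (j+1) i (u - (j+1)) (by omega) (by omega) (by push_cast at hi ⊢; omega)
        · exact ihj (i+1) u hu ht (by push_cast at hi ⊢; omega)

lemma FF_clamp_i : ∀ (i : Nat) (j : Nat) (u : Int), 0 ≤ u → u ≤ (i:Int) →
    FF j i u = FF j u.toNat u := by
  intro i
  induction i with
  | zero =>
    intro j u hu hi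
    rw [show u.toNat = 0 by omega]
  | succ i ih =>
    intro j u hu hi
    by_cases hle : u ≤ (i:Int)
    · rw [FF_stab_i u.toNat j i u hu (le_refl _) hle, ih j u hu hle]
    · rw [show u.toNat = i+1 by push_cast at hi hle; omega]

lemma FF_clamp_j : ∀ (j : Nat) (i : Nat) (u : Int), 0 ≤ u → u ≤ (j:Int) →
    FF j i u = FF u.toNat i u := by
  intro j
  induction j with
  | zero =>
    intro i u hu hj
    rw [show u.toNat = 0 by omega]
  | succ j ih =>
    intro i u hu hj
    by_cases hle : u ≤ (j:Int)
    · rw [FF_stab_j j i u hu hle, ih i u hu hle]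
    · rw [show u.toNat = j+1 by push_cast at hj hle; omega]

-- the min(n,U)/min(m,U) clamps of B do not change the table value at (U, n, m)
lemma FF_min (U n m : Int) (hU : 0 ≤ U) (hn : 0 ≤ n) (hm : 0 ≤ m) :
    FF (min m U).toNat (min n U).toNat U = FF m.toNat n.toNat U := by
  by_cases hnU : n ≤ U
  · rw [min_eq_left (a := n) (b := U) hnU]
    by_cases hmU : m ≤ U
    · rw [min_eq_left (a := m) (b := U) hmU]
    · rw [min_eq_right (a := m) (b := U) (by omega), FF_clamp_j m.toNat n.toNat U hU (by omega)]
  · rw [min_eq_right (a := n) (b := U) (by omega), FF_clamp_i n.toNat m.toNat U hU (by omega)]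
    by_cases hmU : m ≤ U
    · rw [min_eq_left (a := m) (b := U) hmU]
    · rw [min_eq_right (a := m) (b := U) (by omega), FF_clamp_j m.toNat U.toNat U hU (by omega)]

lemma alt_eq_FF (U n m : Int) (hU : 0 ≤ U) (hn : 0 ≤ n) (hm : 0 ≤ m) :
    num_seq_alt U n m = FF m.toNat n.toNat U := by
  show (if U < 0 ∨ n < 0 ∨ m < 0 then 0
    else ((((PySem.List.pyRange 1 (min m U + 1) 1).foldl (bLevel U.toNat)
        ((List.range ((min n U).toNat + 1)).map (fun _ => bRow U.toNat))).getLast?.getD []).getLast?.getD 0))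
      = FF m.toNat n.toNat U
  rw [if_neg (by omega),
    List.map_congr_left (fun (a : Nat) _ => bRow_eq_rowList_lvl0 a U.toNat),
    show min m U + 1 = (((min m U).toNat : Int)) + 1 by omega,
    outer_fold U.toNat (min n U).toNat (min m U).toNat,
    getLast_map_range (fun i => rowList (min m U).toNat i U.toNat) (min n U).toNat []]
  unfold rowList
  rw [getLast_map_range (fun u => FF (min m U).toNat (min n U).toNat (Int.ofNat u)) U.toNat 0]
  rw [show Int.ofNat U.toNat = U from by simpa using Int.toNat_of_nonneg hU]
  exact FF_min U n m hU hn hm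

-- ===== VERDICT (by name: the statement is the Claim_ definition above) =====
theorem num_seq_spec : Claim_equal_num_seq := by
  intro U n m _ hpre
  unfold Spec_num_seq
  by_cases hU : U < 0
  · show numSeqFuel ((n+m).toNat + 1) U n m = num_seq_alt U n m
    rw [show num_seq_alt U n m = 0 from by unfold num_seq_alt; rw [if_pos (Or.inl hU)]]
    show (if U < 0 then (0:Int) else _) = 0
    rw [if_pos hU]
  · rcases hpre with h | ⟨hn, hm⟩
    · omega
    · show numSeqFuel ((n+m).toNat + 1) U n m = num_seq_alt U n m
      rw [numSeqFuel_eq_FF _ U n m hn hm (by omega), alt_eq_FF U n m (by omega) hn hm]
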